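-- pv_equiv track=rewrite | github.com/beerus11/Leetcode | 1422-maximum-score-after-splitting-a-string/1422-maximum-score-after-splitting-a-string.py | maxScore
-- ===== SOURCE A (Python) =====
-- def maxScore(s: str) -> int:
--     z,o = [],[]
--     count = 0
--     for i in s:
--         if i=="0":
--             count+=1
--         z.append(count)
--     count = 0
--     for i in s[::-1]:
--         if i=="1":
--             count+=1
--         o.append(count)
--     o = o[::-1]
--     mx = -1
--     for i in range(1,len(s)):
--         mx = max(mx,z[i-1]+o[i])
--     return mx
-- ===== SOURCE B (Python) =====
-- def maxScore(s: str) -> int: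
--     ones = sum(1 for c in s if c == '1')
--     zeros = 0
--     mx = -1
--     for c in s[:-1]:
--         if c == '0':
--             zeros += 1
--         elif c == '1':
--             ones -= 1
--         mx = max(mx, zeros + ones)
--     return mx
-- ===== Notes on version B (the rewrite author's own statement) =====
-- stated objective: simpler
-- what changed: Replaced the three passes that build prefix-zero and suffix-one arrays (plus two list reversals) with a single left-to-right scan maintaining two scalar counters (zeros seen, ones remaining) after one initial count of '1's; no arrays are built.
import Mathlib
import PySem

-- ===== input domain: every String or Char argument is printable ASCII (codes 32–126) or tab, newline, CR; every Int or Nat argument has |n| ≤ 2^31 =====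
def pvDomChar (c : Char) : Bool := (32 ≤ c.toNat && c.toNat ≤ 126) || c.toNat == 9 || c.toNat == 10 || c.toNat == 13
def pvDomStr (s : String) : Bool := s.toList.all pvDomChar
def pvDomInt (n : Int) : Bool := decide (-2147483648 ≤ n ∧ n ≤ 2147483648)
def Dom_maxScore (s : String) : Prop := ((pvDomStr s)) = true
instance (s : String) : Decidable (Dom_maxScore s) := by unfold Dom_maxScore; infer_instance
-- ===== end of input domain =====

-- B replaces A's three array-building passes (prefix-zero array, suffix-one array, final index loop)
-- by one scan keeping two scalar counters; same return value, O(1) extra space (objective: simpler).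

-- ===== PORT A =====
-- z[i-1] and o[i] are always indexed in range (1 ≤ i < len s), so pyGetD with default 0 is exact here.
def maxScore (s : String) : Int :=
  let l := s.toList
  let z := (l.foldl (fun (st : Int × List Int) c =>
      let cnt := if c = '0' then st.1 + 1 else st.1
      (cnt, st.2 ++ [cnt])) (0, [])).2
  let o := (l.reverse.foldl (fun (st : Int × List Int) c =>
      let cnt := if c = '1' then st.1 + 1 else st.1
      (cnt, st.2 ++ [cnt])) (0, [])).2
  let o := o.reverse
  (PySem.List.pyRange 1 (l.length : Int) 1).foldl
    (fun mx i => max mx (PySem.List.pyGetD z (i - 1) 0 + PySem.List.pyGetD o i 0)) (-1)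

-- ===== PORT B =====
-- 'ones = sum(1 for c in s if c == '1')' is the counting fold; the for-loop over s[:-1] is the main fold.
def maxScore_alt (s : String) : Int :=
  let ones : Int := s.toList.foldl (fun (acc : Int) c => if c == '1' then acc + 1 else acc) 0
  let st := (s.toList.dropLast).foldl
    (fun (st : Int × Int × Int) c =>
      let p := if c = '0' then (st.1 + 1, st.2.1)
               else if c = '1' then (st.1, st.2.1 - 1)
               else (st.1, st.2.1)
      (p.1, p.2, max st.2.2 (p.1 + p.2))) (0, ones, -1)
  st.2.2

-- ===== PRECONDITION & SPEC =====
def Spec_maxScore (s : String) (out : Int) : Prop := out = maxScore_alt s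
instance (s : String) (out : Int) : Decidable (Spec_maxScore s out) := by unfold Spec_maxScore; infer_instance

-- ===== CLAIM (what is proved, stated in full; the proofs are below) =====
def Claim_equal_maxScore : Prop := ∀ (s : String), Dom_maxScore s → Spec_maxScore s (maxScore s)

-- ===== LEMMAS AND PROOFS =====

-- A's two counting loops, in general form: state (count, out-list); the list produced holds the running counts.
theorem countLoop (ch : Char) (l : List Char) : ∀ (c0 : Int) (acc : List Int),
    l.foldl (fun (st : Int × List Int) c =>
      let cnt := if c = ch then st.1 + 1 else st.1
      (cnt, st.2 ++ [cnt])) (c0, acc)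
    = (c0 + (l.count ch : Int),
       acc ++ (List.range l.length).map (fun i => c0 + (((l.take (i+1)).count ch : Int)))) := by
  induction l with
  | nil => intro c0 acc; simp
  | cons c t ih =>
    intro c0 acc
    rw [List.foldl_cons]
    apply Prod.ext
    · show _ = c0 + ((List.count ch (c :: t) : Int))
      rw [ih]
      by_cases h : c = ch <;> simp [h, List.count_cons] <;> push_cast <;> ring
    · show _ = acc ++ _
      rw [ih]
      by_cases h : c = ch <;>
        simp [h, List.range_succ_eq_map, Function.comp_def, List.count_cons,
              List.map_inj_left, List.append_assoc] <;>
        (intro i hi; push_cast; ring)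

-- B's single loop, in general form: state (zeros-so-far, ones-remaining, max), characterised by the counts
-- of the processed prefix.
theorem bLoop (t : List Char) : ∀ (zc oc mx : Int),
    (t.foldl (fun (st : Int × Int × Int) c =>
      let p := if c = '0' then (st.1 + 1, st.2.1)
               else if c = '1' then (st.1, st.2.1 - 1)
               else (st.1, st.2.1)
      (p.1, p.2, max st.2.2 (p.1 + p.2))) (zc, oc, mx)).2.2
    = (List.range t.length).foldl
        (fun m k => max m ((zc + ((t.take (k+1)).count '0' : Int)) + (oc - ((t.take (k+1)).count '1' : Int)))) mx := by
  induction t with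
  | nil => intro zc oc mx; simp
  | cons c t ih =>
    intro zc oc mx
    rw [List.foldl_cons]
    rw [ih, List.length_cons, List.range_succ_eq_map, List.foldl_cons, List.foldl_map]
    have key : ∀ k : Nat,
        (if c = '0' then (zc + 1, oc) else if c = '1' then (zc, oc - 1) else (zc, oc)).1
          + ((t.take k).count '0' : Int)
        + ((if c = '0' then (zc + 1, oc) else if c = '1' then (zc, oc - 1) else (zc, oc)).2
          - ((t.take k).count '1' : Int))
      = zc + (((c :: t).take (k+1)).count '0' : Int) + (oc - (((c :: t).take (k+1)).count '1' : Int)) := by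
      intro k
      by_cases h0 : c = '0'
      · subst h0; simp [List.take_succ_cons, List.count_cons]; push_cast; ring
      · by_cases h1 : c = '1'
        · subst h1; simp [h0, List.take_succ_cons, List.count_cons]; push_cast; ring
        · simp [h0, h1, List.take_succ_cons, List.count_cons]
    congr 1
    · funext m k
      refine congrArg (max m) ?_
      simpa [Nat.succ_eq_add_one] using key (k+1)
    · refine congrArg (max mx) ?_
      simpa using key 0

-- ===== VERDICT (by name: the statement is the Claim_ definition above) =====
theorem maxScore_spec : Claim_equal_maxScore := by
  intro s _
  unfold Spec_maxScore
  simp only [maxScore, maxScore_alt, countLoop, bLoop, PySem.List.foldl_beq_add_one,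
    List.nil_append, List.length_reverse, List.length_dropLast, PySem.List.pyRange_one,
    List.foldl_map, add_sub_cancel_left, zero_add]
  have hc : ∀ k : Nat, (1 : Int) + (k : Int) = ((k + 1 : Nat) : Int) := by
    intro k; push_cast; ring
  simp only [hc, PySem.List.pyGetD_natCast]
  have hlen : (((s.toList.length : Int)) - 1).toNat = s.toList.length - 1 := by omega
  rw [hlen]
  refine PySem.List.foldl_congr_mem _ _ _ _ ?_
  intro mx k hk
  rw [List.mem_range] at hk
  have hb : s.toList.length = s.length := by simp
  refine congrArg (max mx) ?_
  rw [PySem.List.getD_map_range _ _ _ _ (by omega : k < s.toList.length)]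
  have hrevlen : k + 1 < ((List.map (fun i => ((s.toList.reverse.take (i+1)).count '1' : Int))
      (List.range s.toList.length)).reverse).length := by
    simp; omega
  rw [List.getD_eq_getElem _ _ hrevlen, List.getElem_reverse, List.getElem_map, List.getElem_range]
  simp only [List.length_map, List.length_range]
  rw [List.take_reverse, List.count_reverse]
  rw [show s.toList.length - (s.toList.length - 1 - (k + 1) + 1) = k + 1 from by omega]
  have ht : s.toList.dropLast.take (k+1) = s.toList.take (k+1) := by
    rw [List.dropLast_eq_take, List.take_take]
    congr 1; omega
  rw [ht]
  have hsplit : (s.toList.count '1' : Int)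
      = ((s.toList.take (k+1)).count '1' : Int) + ((s.toList.drop (k+1)).count '1' : Int) := by
    conv_lhs => rw [← List.take_append_drop (k+1) s.toList]
    rw [List.count_append]; push_cast; ring
  rw [hsplit]
  ring
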